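-- pv_equiv track=rewrite | github.com/code-logger/apnaCollege | helper/misc.py | parse_m3u8_data
-- ===== SOURCE A (Python) =====
-- def parse_m3u8_data(dt):
--     dt = dt.split("\n")
--     next= False
--     for each in dt:
--         if(next):
--             return each
--         if(each.find("720") != -1):
--             next= True
-- ===== SOURCE B (Python) =====
-- def parse_m3u8_data(dt):
--     i = dt.find("720")
--     if i == -1:
--         return None
--     nl = dt.find("\n", i)
--     if nl == -1:
--         return None
--     e = dt.find("\n", nl + 1)
--     return dt[nl + 1:] if e == -1 else dt[nl + 1:e]
-- ===== Notes on version B (the rewrite author's own statement) =====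
-- stated objective: alternative
-- what changed: B never splits the string: it locates the first occurrence of '720' with str.find on the raw string, then the next two newlines, and slices the line between them, instead of materialising all lines and scanning them with a carry-over boolean flag.
import Mathlib
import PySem

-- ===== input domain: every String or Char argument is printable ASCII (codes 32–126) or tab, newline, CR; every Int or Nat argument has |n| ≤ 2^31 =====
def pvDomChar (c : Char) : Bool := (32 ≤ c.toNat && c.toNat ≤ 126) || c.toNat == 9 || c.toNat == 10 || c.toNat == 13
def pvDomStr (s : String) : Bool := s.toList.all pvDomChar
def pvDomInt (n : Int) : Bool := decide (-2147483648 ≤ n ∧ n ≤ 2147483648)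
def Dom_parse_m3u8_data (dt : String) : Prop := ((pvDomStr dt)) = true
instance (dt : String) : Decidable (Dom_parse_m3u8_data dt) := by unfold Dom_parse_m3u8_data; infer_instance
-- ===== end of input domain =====

-- B never splits the string into lines: it finds the first '720' on the raw string,
-- then the next two newlines, and slices the line between them (objective: alternative).

-- ===== PORT A =====
-- the for-loop with the 'next' flag, step for step
def parseAGo : List String → Bool → Option String
  | [], _ => none
  | each :: rest, next =>
    if next then some each
    else parseAGo rest (decide (PySem.Str.find each "720" ≠ -1))

def parse_m3u8_data (dt : String) : Option String :=
  parseAGo ((PySem.Str.split? dt "\n").getD []) false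

-- ===== PORT B =====
-- i = dt.find("720"); nl = dt.find("\n", i); e = dt.find("\n", nl+1); slice out the line
def parse_m3u8_data_alt (dt : String) : Option String :=
  let i := PySem.Str.find dt "720"
  if i = -1 then none
  else
    let nl := PySem.Str.findFrom dt "\n" i
    if nl = -1 then none
    else
      let e := PySem.Str.findFrom dt "\n" (nl + 1)
      if e = -1 then some (PySem.Str.slice dt (some (nl + 1)) none)
      else some (PySem.Str.slice dt (some (nl + 1)) (some e))

-- ===== PRECONDITION & SPEC =====
def Spec_parse_m3u8_data (dt : String) (out : Option String) : Prop := out = parse_m3u8_data_alt dt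
instance (dt : String) (out : Option String) : Decidable (Spec_parse_m3u8_data dt out) := by unfold Spec_parse_m3u8_data; infer_instance

-- ===== CLAIM (what is proved, stated in full; the proofs are below) =====
def Claim_equal_parse_m3u8_data : Prop := ∀ (dt : String), Dom_parse_m3u8_data dt → Spec_parse_m3u8_data dt (parse_m3u8_data dt)

-- ===== LEMMAS AND PROOFS =====

-- '720' as a char list
def pvSub : List Char := ['7', '2', '0']

-- chars-level mirror of A's loop
def goA : List (List Char) → Bool → Option (List Char)
  | [], _ => none
  | each :: rest, next =>
    if next then some each
    else goA rest (decide (PySem.Chars.find each pvSub ≠ -1))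

-- chars-level mirror of B
def charsB (cs : List Char) : Option (List Char) :=
  if PySem.Chars.find cs pvSub = -1 then none
  else if PySem.Chars.findFrom cs ['\n'] (PySem.Chars.find cs pvSub) none = -1 then none
  else if PySem.Chars.findFrom cs ['\n']
      (PySem.Chars.findFrom cs ['\n'] (PySem.Chars.find cs pvSub) none + 1) none = -1 then
    some (PySem.List.slice cs
      (some (PySem.Chars.findFrom cs ['\n'] (PySem.Chars.find cs pvSub) none + 1)) none)
  else
    some (PySem.List.slice cs
      (some (PySem.Chars.findFrom cs ['\n'] (PySem.Chars.find cs pvSub) none + 1))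
      (some (PySem.Chars.findFrom cs ['\n']
        (PySem.Chars.findFrom cs ['\n'] (PySem.Chars.find cs pvSub) none + 1) none)))

-- structural version of splitOn on '\n'
def sOn : List Char → List Char → List (List Char)
  | pre, [] => [pre]
  | pre, c :: t => if c = '\n' then pre :: sOn [] t else sOn (pre ++ [c]) t

lemma go_spec : ∀ (fuel : Nat) (l cur : List Char) (acc : List (List Char)), l.length ≤ fuel →
    PySem.Chars.splitOn.go ['\n'] fuel l cur acc = acc.reverse ++ sOn cur.reverse l := by
  intro fuel
  induction fuel with
  | zero => intro l cur acc h
            have : l = [] := by cases l <;> simp_all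
            subst this
            simp [PySem.Chars.splitOn.go, sOn]
  | succ f ih =>
    intro l cur acc h
    cases l with
    | nil => simp [PySem.Chars.splitOn.go, sOn]
    | cons c rest =>
      simp only [PySem.Chars.splitOn.go]
      by_cases hc : c = '\n'
      · subst hc
        simp [List.isPrefixOf, ih rest [] _ (by simpa using h), sOn]
      · have hb : ('\n' == c) = false := by simpa using fun h' => hc h'.symm
        simp only [List.isPrefixOf, hb]
        simp [ih rest (c :: cur) acc (by simpa using h), sOn, hc]

lemma splitOn_eq_sOn (cs : List Char) : PySem.Chars.splitOn cs ['\n'] = sOn [] cs := by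
  simpa using go_spec (cs.length + 1) cs [] [] (by omega)

lemma sOn_no_nl (cs : List Char) (h : '\n' ∉ cs) : ∀ pre, sOn pre cs = [pre ++ cs] := by
  induction cs with
  | nil => intro pre; simp [sOn]
  | cons c t ih =>
    intro pre
    have hc : c ≠ '\n' := fun hc => h (hc ▸ List.mem_cons_self)
    simp only [sOn, if_neg hc]
    rw [ih (fun hm => h (List.mem_cons_of_mem _ hm))]
    simp

lemma sOn_append (a b : List Char) (h : '\n' ∉ a) : ∀ pre,
    sOn pre (a ++ '\n' :: b) = (pre ++ a) :: sOn [] b := by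
  induction a with
  | nil => intro pre; simp [sOn]
  | cons c t ih =>
    intro pre
    have hc : c ≠ '\n' := fun hc => h (hc ▸ List.mem_cons_self)
    simp only [List.cons_append, sOn, if_neg hc]
    rw [ih (fun hm => h (List.mem_cons_of_mem _ hm))]
    simp

lemma prefix_append_nl {sub a b : List Char} (h : '\n' ∉ sub) :
    sub <+: a ++ '\n' :: b ↔ sub <+: a := by
  constructor
  · intro hp
    by_cases hl : sub.length ≤ a.length
    · exact (List.isPrefix_append_of_length hl).mp hp
    · exfalso
      have hlen : a.length < sub.length := by omega
      have := hp.getElem (i := a.length) hlen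
      rw [List.getElem_append_right (le_refl a.length)] at this
      simp at this
      exact h (this ▸ List.getElem_mem hlen)
  · intro hp; exact List.prefix_append_of_prefix hp

lemma infix_drop_iff (sub s : List Char) : sub <:+: s ↔ ∃ j, sub <+: s.drop j := by
  rw [← PySem.Chars.isIn_iff_infix, ← PySem.Chars.exists_prefix_drop_iff_isIn]

lemma drop_append_nl (a b : List Char) (j : Nat) :
    (a ++ '\n' :: b).drop (a.length + 1 + j) = b.drop j := by
  have := List.drop_length_add_append (l₁ := a) (l₂ := '\n' :: b) (i := 1 + j)
  rw [show a.length + 1 + j = a.length + (1 + j) by omega, this,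
    show 1 + j = j + 1 by omega, List.drop_succ_cons]

lemma infix_append_nl {sub a b : List Char} (h : '\n' ∉ sub) :
    sub <:+: a ++ '\n' :: b ↔ sub <:+: a ∨ sub <:+: b := by
  simp only [infix_drop_iff]
  constructor
  · rintro ⟨j, hj⟩
    by_cases hja : j ≤ a.length
    · left
      refine ⟨j, ?_⟩
      rw [List.drop_append_of_le_length hja] at hj
      exact (prefix_append_nl h).mp hj
    · right
      refine ⟨j - a.length - 1, ?_⟩
      rw [show j = a.length + 1 + (j - a.length - 1) by omega, drop_append_nl] at hj
      exact hj
  · rintro (⟨j, hj⟩ | ⟨j, hj⟩)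
    · refine ⟨j, ?_⟩
      by_cases hja : j ≤ a.length
      · rw [List.drop_append_of_le_length hja]
        exact List.prefix_append_of_prefix hj
      · rw [List.drop_eq_nil_of_le (by omega)] at hj
        simp only [List.prefix_nil] at hj
        subst hj; simp
    · exact ⟨a.length + 1 + j, by rw [drop_append_nl]; exact hj⟩

lemma find_eq_coe {s sub : List Char} {k : Nat} (h1 : sub <+: s.drop k)
    (h2 : ∀ i < k, ¬ sub <+: s.drop i) : PySem.Chars.find s sub = (k : Int) := by
  have hinf : sub <:+: s := (infix_drop_iff sub s).mpr ⟨k, h1⟩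
  have hnn : 0 ≤ PySem.Chars.find s sub := (PySem.Chars.find_nonneg_iff s sub).mpr hinf
  obtain ⟨hp, hmin⟩ := PySem.Chars.find_spec (s := s) (sub := sub) hnn
  have hf : (PySem.Chars.find s sub).toNat = k := by
    rcases Nat.lt_trichotomy (PySem.Chars.find s sub).toNat k with h | h | h
    · exact absurd hp (h2 _ h)
    · exact h
    · exact absurd h1 (hmin _ h)
  omega

lemma find_no_nl {x : List Char} (h : '\n' ∉ x) : PySem.Chars.find x ['\n'] = -1 := by
  rw [PySem.Chars.find_eq_neg_one_iff]
  rw [List.singleton_infix_iff]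
  exact h

lemma find_first_nl {x : List Char} (y : List Char) (h : '\n' ∉ x) :
    PySem.Chars.find (x ++ '\n' :: y) ['\n'] = (x.length : Int) := by
  apply find_eq_coe
  · rw [List.drop_append_of_le_length le_rfl]
    simp
  · intro i hi hp
    rcases hp with ⟨t, ht⟩
    rw [List.drop_append_of_le_length (by omega)] at ht
    have hx : x.drop i ≠ [] := by
      intro he; rw [List.drop_eq_nil_iff] at he; omega
    have : (x.drop i).head hx = '\n' := by
      have := congrArg (fun l => l.head?) ht
      simpa [List.head?_append_of_ne_nil _ hx, List.head?_eq_some_head hx] using this.symm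
    exact h (List.mem_of_mem_drop (this ▸ List.head_mem hx))

lemma split_first_nl {cs : List Char} (h : '\n' ∈ cs) :
    ∃ a b, cs = a ++ '\n' :: b ∧ '\n' ∉ a := by
  refine ⟨cs.takeWhile (fun c => !(c == '\n')), (cs.dropWhile (fun c => !(c == '\n'))).tail, ?_, ?_⟩
  · have hne : cs.dropWhile (fun c => !(c == '\n')) ≠ [] := by
      intro he
      have := List.dropWhile_eq_nil_iff.mp he
      simpa using this '\n' h
    have hh := List.head_dropWhile_not (fun c => !(c == '\n')) hne
    simp at hh
    have hd : cs.dropWhile (fun c => !(c == '\n')) =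
        '\n' :: (cs.dropWhile (fun c => !(c == '\n'))).tail := by
      have h2 := (List.cons_head_tail hne).symm
      rw [hh] at h2
      exact h2
    conv_lhs => rw [← List.takeWhile_append_dropWhile (p := fun c => !(c == '\n')) (l := cs), hd]
  · intro hm
    have := List.mem_takeWhile_imp hm
    simp at this

lemma nl_not_mem_pvSub : '\n' ∉ pvSub := by decide

lemma len_append_nl (a b : List Char) : (a ++ '\n' :: b).length = a.length + 1 + b.length := by
  simp; omega

-- the first '720' of (a ++ '\n' :: b) with a hit in a lies inside a, and the next newline is at a.length
lemma hit_i_nonneg (a b : List Char) (hma : pvSub <:+: a) :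
    0 ≤ PySem.Chars.find (a ++ '\n' :: b) pvSub := by
  refine (PySem.Chars.find_nonneg_iff _ _).mpr ?_
  exact (infix_append_nl nl_not_mem_pvSub).mpr (Or.inl hma)

lemma hit_toNat_le (a b : List Char) (hma : pvSub <:+: a) :
    (PySem.Chars.find (a ++ '\n' :: b) pvSub).toNat ≤ a.length := by
  obtain ⟨j, hj⟩ := (infix_drop_iff _ _).mp hma
  have hjle : j ≤ a.length := by
    have h1 := hj.length_le
    have h3 : pvSub.length = 3 := by decide
    simp [h3] at h1
    omega
  have hjcs : pvSub <+: (a ++ '\n' :: b).drop j := by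
    rw [List.drop_append_of_le_length hjle]
    exact List.prefix_append_of_prefix hj
  obtain ⟨_, hmin⟩ := PySem.Chars.find_spec (s := a ++ '\n' :: b) (sub := pvSub)
    (hit_i_nonneg a b hma)
  have hij : (PySem.Chars.find (a ++ '\n' :: b) pvSub).toNat ≤ j := by
    by_contra hlt
    exact hmin j (by omega) hjcs
  have h1 := hj.length_le
  have h3 : pvSub.length = 3 := by decide
  simp [h3] at h1
  omega

lemma hit_nl (a b : List Char) (hna : '\n' ∉ a) (hma : pvSub <:+: a) :
    PySem.Chars.findFrom (a ++ '\n' :: b) ['\n'] (PySem.Chars.find (a ++ '\n' :: b) pvSub) none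
      = (a.length : Int) := by
  have hi0 := hit_i_nonneg a b hma
  have hile := hit_toNat_le a b hma
  rw [← Int.toNat_of_nonneg hi0]
  rw [PySem.Chars.findFrom_natCast _ _ _ (by rw [len_append_nl]; omega)]
  rw [List.drop_append_of_le_length hile]
  rw [find_first_nl b (fun hm => hna (List.mem_of_mem_drop hm))]
  rw [if_neg (by omega)]
  rw [List.length_drop]
  omega

-- B hits on the first line and the rest is a single line
lemma charsB_hit_nonl (a b : List Char) (hna : '\n' ∉ a) (hnb : '\n' ∉ b)
    (hma : pvSub <:+: a) : charsB (a ++ '\n' :: b) = some b := by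
  unfold charsB
  rw [if_neg (by have := hit_i_nonneg a b hma; omega)]
  rw [hit_nl a b hna hma]
  rw [if_neg (by omega)]
  have h1 : (a.length : Int) + 1 = ((a.length + 1 : Nat) : Int) := by push_cast; omega
  rw [h1, PySem.Chars.findFrom_natCast _ _ _ (by rw [len_append_nl]; omega)]
  have h2 : (a ++ '\n' :: b).drop (a.length + 1) = b := by
    simp

  rw [h2, find_no_nl hnb, if_pos rfl, if_pos rfl]
  rw [← h1]
  have h3 : (a.length : Int) + 1 = ((a.length + 1 : Nat) : Int) := h1
  rw [h3, PySem.List.slice_from_natCast, h2]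

-- B hits on the first line and the rest has another newline
lemma charsB_hit_nl (a a' b' : List Char) (hna : '\n' ∉ a) (hna' : '\n' ∉ a')
    (hma : pvSub <:+: a) :
    charsB (a ++ '\n' :: (a' ++ '\n' :: b')) = some a' := by
  unfold charsB
  rw [if_neg (by have := hit_i_nonneg a (a' ++ '\n' :: b') hma; omega)]
  rw [hit_nl a (a' ++ '\n' :: b') hna hma]
  rw [if_neg (by omega)]
  have h1 : (a.length : Int) + 1 = ((a.length + 1 : Nat) : Int) := by push_cast; omega
  rw [h1, PySem.Chars.findFrom_natCast _ _ _ (by rw [len_append_nl]; omega)]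
  have h2 : (a ++ '\n' :: (a' ++ '\n' :: b')).drop (a.length + 1) = a' ++ '\n' :: b' := by
    simp
  rw [h2, find_first_nl b' hna']
  rw [if_neg (by omega)]
  rw [if_neg (by omega)]
  have h4 : ((a.length + 1 : Nat) : Int) + (a'.length : Int)
      = ((a.length + 1 + a'.length : Nat) : Int) := by push_cast; omega
  rw [h4, PySem.List.slice_natCast, h2]
  have h5 : a.length + 1 + a'.length - (a.length + 1) = a'.length := by omega
  rw [h5, List.take_left' rfl]

-- when the first line has no hit, B on the whole string is B on the rest
lemma charsB_shift (a b : List Char) (_hna : '\n' ∉ a) (hma : ¬ pvSub <:+: a) :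
    charsB (a ++ '\n' :: b) = charsB b := by
  by_cases hmc : pvSub <:+: b
  · have hj0 : 0 ≤ PySem.Chars.find b pvSub := (PySem.Chars.find_nonneg_iff b pvSub).mpr hmc
    obtain ⟨hpb, hminb⟩ := PySem.Chars.find_spec (s := b) (sub := pvSub) hj0
    have hjle : (PySem.Chars.find b pvSub).toNat ≤ b.length := by
      have := PySem.Chars.find_le_length b pvSub; omega
    have hics : PySem.Chars.find (a ++ '\n' :: b) pvSub
        = ((a.length + 1 + (PySem.Chars.find b pvSub).toNat : Nat) : Int) := by
      apply find_eq_coe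
      · rw [drop_append_nl]; exact hpb
      · intro i' hi' hp
        by_cases hia : i' ≤ a.length
        · rw [List.drop_append_of_le_length hia] at hp
          exact hma ((infix_drop_iff _ _).mpr ⟨i', (prefix_append_nl nl_not_mem_pvSub).mp hp⟩)
        · rw [show i' = a.length + 1 + (i' - a.length - 1) by omega, drop_append_nl] at hp
          exact hminb (i' - a.length - 1) (by omega) hp
    have g1 : ¬(((a.length + 1 + (PySem.Chars.find b pvSub).toNat : Nat) : Int) = -1) := by omega
    have g2 : ¬((((PySem.Chars.find b pvSub).toNat : Nat) : Int) = -1) := by omega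
    unfold charsB
    rw [hics]
    conv_rhs => rw [← Int.toNat_of_nonneg hj0]
    rw [if_neg g1, if_neg g2]
    rw [PySem.Chars.findFrom_natCast (a ++ '\n' :: b) ['\n']
      (a.length + 1 + (PySem.Chars.find b pvSub).toNat) (by rw [len_append_nl]; omega)]
    rw [PySem.Chars.findFrom_natCast b ['\n'] (PySem.Chars.find b pvSub).toNat hjle]
    rw [drop_append_nl]
    by_cases hq : PySem.Chars.find (b.drop (PySem.Chars.find b pvSub).toNat) ['\n'] = -1
    · simp [hq]
    · have hq0 : 0 ≤ PySem.Chars.find (b.drop (PySem.Chars.find b pvSub).toNat) ['\n'] := by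
        have := PySem.Chars.neg_one_le_find (b.drop (PySem.Chars.find b pvSub).toNat) ['\n']
        omega
      obtain ⟨hpq, -⟩ := PySem.Chars.find_spec (s := b.drop (PySem.Chars.find b pvSub).toNat)
        (sub := ['\n']) hq0
      have hmlt : (PySem.Chars.find b pvSub).toNat
          + (PySem.Chars.find (b.drop (PySem.Chars.find b pvSub).toNat) ['\n']).toNat
          < b.length := by
        have := hpq.length_le
        simp [List.length_drop] at this
        omega
      have g3 : ¬(((a.length + 1 + (PySem.Chars.find b pvSub).toNat : Nat) : Int)
          + PySem.Chars.find (b.drop (PySem.Chars.find b pvSub).toNat) ['\n'] = -1) := by omega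
      have g4 : ¬((((PySem.Chars.find b pvSub).toNat : Nat) : Int)
          + PySem.Chars.find (b.drop (PySem.Chars.find b pvSub).toNat) ['\n'] = -1) := by omega
      rw [if_neg hq, if_neg hq, if_neg g3, if_neg g4]
      have e1 : ((a.length + 1 + (PySem.Chars.find b pvSub).toNat : Nat) : Int)
          + PySem.Chars.find (b.drop (PySem.Chars.find b pvSub).toNat) ['\n'] + 1
          = ((a.length + 1 + ((PySem.Chars.find b pvSub).toNat
              + (PySem.Chars.find (b.drop (PySem.Chars.find b pvSub).toNat) ['\n']).toNat + 1) : Nat) : Int) := by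
        omega
      have e2 : (((PySem.Chars.find b pvSub).toNat : Nat) : Int)
          + PySem.Chars.find (b.drop (PySem.Chars.find b pvSub).toNat) ['\n'] + 1
          = (((PySem.Chars.find b pvSub).toNat
              + (PySem.Chars.find (b.drop (PySem.Chars.find b pvSub).toNat) ['\n']).toNat + 1 : Nat) : Int) := by
        omega
      rw [e1, e2]
      rw [PySem.Chars.findFrom_natCast (a ++ '\n' :: b) ['\n']
        (a.length + 1 + ((PySem.Chars.find b pvSub).toNat
          + (PySem.Chars.find (b.drop (PySem.Chars.find b pvSub).toNat) ['\n']).toNat + 1))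
        (by rw [len_append_nl]; omega)]
      rw [PySem.Chars.findFrom_natCast b ['\n']
        ((PySem.Chars.find b pvSub).toNat
          + (PySem.Chars.find (b.drop (PySem.Chars.find b pvSub).toNat) ['\n']).toNat + 1)
        (by omega)]
      rw [drop_append_nl]
      by_cases hr : PySem.Chars.find (b.drop ((PySem.Chars.find b pvSub).toNat
          + (PySem.Chars.find (b.drop (PySem.Chars.find b pvSub).toNat) ['\n']).toNat + 1)) ['\n'] = -1
      · rw [if_pos hr, if_pos hr]
        simp only [reduceIte]
        rw [PySem.List.slice_from_natCast, PySem.List.slice_from_natCast, drop_append_nl]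
      · have hr0 : 0 ≤ PySem.Chars.find (b.drop ((PySem.Chars.find b pvSub).toNat
            + (PySem.Chars.find (b.drop (PySem.Chars.find b pvSub).toNat) ['\n']).toNat + 1)) ['\n'] := by
          have := PySem.Chars.neg_one_le_find (b.drop ((PySem.Chars.find b pvSub).toNat
            + (PySem.Chars.find (b.drop (PySem.Chars.find b pvSub).toNat) ['\n']).toNat + 1)) ['\n']
          omega
        have g5 : ¬(((a.length + 1 + ((PySem.Chars.find b pvSub).toNat
            + (PySem.Chars.find (b.drop (PySem.Chars.find b pvSub).toNat) ['\n']).toNat + 1) : Nat) : Int)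
            + PySem.Chars.find (b.drop ((PySem.Chars.find b pvSub).toNat
              + (PySem.Chars.find (b.drop (PySem.Chars.find b pvSub).toNat) ['\n']).toNat + 1)) ['\n'] = -1) := by
          omega
        have g6 : ¬(((((PySem.Chars.find b pvSub).toNat
            + (PySem.Chars.find (b.drop (PySem.Chars.find b pvSub).toNat) ['\n']).toNat + 1) : Nat) : Int)
            + PySem.Chars.find (b.drop ((PySem.Chars.find b pvSub).toNat
              + (PySem.Chars.find (b.drop (PySem.Chars.find b pvSub).toNat) ['\n']).toNat + 1)) ['\n'] = -1) := by
          omega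
        rw [if_neg hr, if_neg hr, if_neg g5, if_neg g6]
        rw [← Int.toNat_of_nonneg hr0]
        simp only [← Nat.cast_add]
        rw [PySem.List.slice_natCast, PySem.List.slice_natCast, drop_append_nl]
        congr 2
        omega
  · have h1 : PySem.Chars.find (a ++ '\n' :: b) pvSub = -1 := by
      apply (PySem.Chars.find_eq_neg_one_iff _ _).mpr
      rw [infix_append_nl nl_not_mem_pvSub]
      rintro (h | h)
      exacts [hma h, hmc h]
    have h2 : PySem.Chars.find b pvSub = -1 := (PySem.Chars.find_eq_neg_one_iff b pvSub).mpr hmc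
    unfold charsB
    rw [if_pos h1, if_pos h2]

lemma main_chars : ∀ (n : Nat) (cs : List Char), cs.length ≤ n →
    charsB cs = goA (sOn [] cs) false := by
  intro n
  induction n with
  | zero =>
    intro cs h
    have : cs = [] := by cases cs <;> simp_all
    subst this; decide
  | succ n ih =>
    intro cs hlen
    by_cases hnl : '\n' ∈ cs
    · obtain ⟨a, b, rfl, hna⟩ := split_first_nl hnl
      rw [sOn_append a b hna []]
      simp only [List.nil_append]
      by_cases hma : pvSub <:+: a
      · have hfl : (decide (PySem.Chars.find a pvSub ≠ -1)) = true := by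
          simp [(PySem.Chars.find_ne_neg_one_iff a pvSub).mpr hma]
        rw [show goA (a :: sOn [] b) false
            = goA (sOn [] b) (decide (PySem.Chars.find a pvSub ≠ -1)) from rfl, hfl]
        by_cases hnb : '\n' ∈ b
        · obtain ⟨a', b', rfl, hna'⟩ := split_first_nl hnb
          rw [sOn_append a' b' hna' [], charsB_hit_nl a a' b' hna hna' hma]
          rfl
        · rw [sOn_no_nl b hnb [], charsB_hit_nonl a b hna hnb hma]
          rfl
      · have hfl : (decide (PySem.Chars.find a pvSub ≠ -1)) = false := by
          simp [(PySem.Chars.find_eq_neg_one_iff a pvSub).mpr hma]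
        rw [show goA (a :: sOn [] b) false
            = goA (sOn [] b) (decide (PySem.Chars.find a pvSub ≠ -1)) from rfl, hfl]
        rw [charsB_shift a b hna hma]
        exact ih b (by have := len_append_nl a b; omega)
    · rw [sOn_no_nl cs hnl []]
      simp only [List.nil_append]
      have hA : goA [cs] false = none := by
        rw [show goA [cs] false
            = goA [] (decide (PySem.Chars.find cs pvSub ≠ -1)) from rfl]
        rfl
      rw [hA]
      unfold charsB
      by_cases hm : PySem.Chars.find cs pvSub = -1
      · rw [if_pos hm]
      · rw [if_neg hm]
        have hi0 : 0 ≤ PySem.Chars.find cs pvSub := by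
          have := PySem.Chars.neg_one_le_find cs pvSub; omega
        have hile : (PySem.Chars.find cs pvSub).toNat ≤ cs.length := by
          have := PySem.Chars.find_le_length cs pvSub; omega
        rw [← Int.toNat_of_nonneg hi0,
          PySem.Chars.findFrom_natCast _ _ _ hile,
          find_no_nl (fun hmem => hnl (List.mem_of_mem_drop hmem)), if_pos rfl, if_pos rfl]

-- bridges to the String-level ports
lemma parseAGo_eq_goA (ls : List (List Char)) (b : Bool) :
    parseAGo (ls.map String.ofList) b = (goA ls b).map String.ofList := by
  induction ls generalizing b with
  | nil => simp [parseAGo, goA]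
  | cons e rest ih =>
    simp only [List.map_cons, parseAGo, goA]
    cases b with
    | true => simp
    | false =>
      rw [if_neg (by simp), if_neg (by simp), ih]
      have : PySem.Str.find (String.ofList e) "720" = PySem.Chars.find e pvSub := by
        simp [PySem.Str.find, pvSub]
      rw [this]

lemma altB_eq_charsB (dt : String) :
    parse_m3u8_data_alt dt = (charsB dt.toList).map String.ofList := by
  unfold parse_m3u8_data_alt charsB
  have h7 : ("720" : String).toList = pvSub := by decide
  have hn : ("\n" : String).toList = ['\n'] := by decide
  simp only [PySem.Str.find_eq, PySem.Str.findFrom_eq, PySem.Str.slice, h7, hn,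
    PySem.Chars.slice_eq_listSlice]
  split_ifs <;> simp

-- ===== VERDICT (by name: the statement is the Claim_ definition above) =====
theorem parse_m3u8_data_spec : Claim_equal_parse_m3u8_data := by
  intro dt _
  unfold Spec_parse_m3u8_data
  rw [altB_eq_charsB, main_chars dt.toList.length dt.toList le_rfl, ← splitOn_eq_sOn]
  unfold parse_m3u8_data
  have : (PySem.Str.split? dt "\n").getD [] = (PySem.Chars.splitOn dt.toList ['\n']).map String.ofList := by
    simp [PySem.Str.split?, PySem.Chars.split?]
  rw [this, parseAGo_eq_goA]
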